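-- pv_equiv track=rewrite | github.com/samar-khanna/cropmap | segmentation/trainers/trainer_utils.py | get_display_indices
-- ===== SOURCE A (Python) =====
-- def get_display_indices(batch_index, batch_size, num_display, len_loader, curr_len_display):
--     """
--     Checks if current batch has the next display item(s) given the current number
--     of items queued for display.
--     @param batch_index: Index of current batch
--     @param batch_size: Size of each batch of items
--     @param num_display: Total intended number of items to display
--     @param len_loader: Number of batches in the data loader
--     @param curr_len_display: Current number of items queued for display
--     @return: Indices within current batch if to display, else empty list.
--     """
--     b = batch_size
--     n = num_display
--     total = len_loader * b  # total number of items (i.e. images)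
--
--     if n == 0: return []
--
--     # total_items/num_display gives number of items to skip before next index
--     target = (total // n) * curr_len_display if (total // n) > 0 else curr_len_display
--
--     # If target item idx is within curr batch, return the idx mod curr batch
--     indices = []
--     while batch_index * b <= target < min((batch_index + 1) * b, len_loader * b):
--         indices.append(target % (batch_index * b) if batch_index * b > 0 else target)
--
--         target = curr_len_display + len(indices)
--         target *= (total // n) if (total // n) > 0 else 1
--
--     return indices
-- ===== SOURCE B (Python) =====
-- def get_display_indices(batch_index, batch_size, num_display, len_loader, curr_len_display):
--     if num_display == 0:
--         return []
--     total = len_loader * batch_size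
--     q = total // num_display
--     step = q if q > 0 else 1
--     lo = batch_index * batch_size
--     hi = min((batch_index + 1) * batch_size, total)
--     first = step * curr_len_display
--     if not (lo <= first < hi):
--         return []
--     count = (hi - 1) // step - curr_len_display + 1
--     return [(step * (curr_len_display + j)) % lo if lo > 0 else step * (curr_len_display + j)
--             for j in range(count)]
-- ===== Notes on version B (the rewrite author's own statement) =====
-- stated objective: alternative
-- what changed: Replaces A's append-one-index-at-a-time while loop by a closed-form count of the valid consecutive targets (floor((hi-1)/step) - curr_len_display + 1) followed by a single comprehension over range(count).
import Mathlib
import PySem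

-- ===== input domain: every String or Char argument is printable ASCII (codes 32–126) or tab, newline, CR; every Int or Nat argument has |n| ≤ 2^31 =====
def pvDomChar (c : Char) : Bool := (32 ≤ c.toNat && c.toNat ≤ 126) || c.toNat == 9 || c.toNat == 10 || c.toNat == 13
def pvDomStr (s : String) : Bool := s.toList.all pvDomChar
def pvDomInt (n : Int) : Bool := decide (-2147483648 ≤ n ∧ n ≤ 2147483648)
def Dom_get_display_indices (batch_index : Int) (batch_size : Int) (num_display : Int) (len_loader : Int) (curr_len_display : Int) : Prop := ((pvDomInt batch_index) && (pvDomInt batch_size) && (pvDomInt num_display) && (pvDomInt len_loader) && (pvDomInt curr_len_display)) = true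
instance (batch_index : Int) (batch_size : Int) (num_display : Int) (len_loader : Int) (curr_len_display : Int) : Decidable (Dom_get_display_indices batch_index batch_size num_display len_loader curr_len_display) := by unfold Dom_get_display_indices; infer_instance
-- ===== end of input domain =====

-- B replaces A's while loop by a closed-form count of the valid targets plus one comprehension.

-- ===== PORT A =====
-- A's while loop; the loop variable `target` always equals step*(curr+len(indices))
-- (A recomputes it that way at the end of every iteration), so the state is the
-- iteration count k = len(indices) and the accumulator.
def pvLoopA (step lo hi curr : Int) (hstep : 0 < step) (k : Nat) (acc : List Int) : List Int :=
  if lo ≤ step * (curr + k) ∧ step * (curr + k) < hi then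
    pvLoopA step lo hi curr hstep (k + 1)
      (acc ++ [if lo > 0 then PySem.Int.mod (step * (curr + k)) lo else step * (curr + k)])
  else acc
termination_by (hi - step * (curr + k)).toNat
decreasing_by
  have h1 : step * (curr + ((k : Int) + 1)) = step * (curr + k) + step := by ring
  push_cast
  omega

def get_display_indices (batch_index : Int) (batch_size : Int) (num_display : Int) (len_loader : Int) (curr_len_display : Int) : List Int :=
  if num_display == 0 then []
  else
    let total := len_loader * batch_size
    let q := PySem.Int.floordiv total num_display
    pvLoopA (if q > 0 then q else 1) (batch_index * batch_size)
      (min ((batch_index + 1) * batch_size) total) curr_len_display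
      (by split <;> omega) 0 []

-- ===== PORT B =====
def get_display_indices_alt (batch_index : Int) (batch_size : Int) (num_display : Int) (len_loader : Int) (curr_len_display : Int) : List Int :=
  if num_display == 0 then []
  else
    let total := len_loader * batch_size
    let q := PySem.Int.floordiv total num_display
    let step := if q > 0 then q else 1
    let lo := batch_index * batch_size
    let hi := min ((batch_index + 1) * batch_size) total
    let first := step * curr_len_display
    if lo ≤ first ∧ first < hi then
      let count := PySem.Int.floordiv (hi - 1) step - curr_len_display + 1
      (PySem.List.pyRange 0 count 1).map (fun j =>
        if lo > 0 then PySem.Int.mod (step * (curr_len_display + j)) lo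
        else step * (curr_len_display + j))
    else []

-- ===== PRECONDITION & SPEC =====
def Spec_get_display_indices (batch_index : Int) (batch_size : Int) (num_display : Int) (len_loader : Int) (curr_len_display : Int) (out : List Int) : Prop := out = get_display_indices_alt batch_index batch_size num_display len_loader curr_len_display
instance (batch_index : Int) (batch_size : Int) (num_display : Int) (len_loader : Int) (curr_len_display : Int) (out : List Int) : Decidable (Spec_get_display_indices batch_index batch_size num_display len_loader curr_len_display out) := by unfold Spec_get_display_indices; infer_instance

-- ===== CLAIM (what is proved, stated in full; the proofs are below) =====
def Claim_equal_get_display_indices : Prop := ∀ (batch_index : Int) (batch_size : Int) (num_display : Int) (len_loader : Int) (curr_len_display : Int), Dom_get_display_indices batch_index batch_size num_display len_loader curr_len_display → Spec_get_display_indices batch_index batch_size num_display len_loader curr_len_display (get_display_indices batch_index batch_size num_display len_loader curr_len_display)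

-- ===== LEMMAS AND PROOFS =====

theorem pvLoopA_eq (step lo hi curr : Int) (hstep : 0 < step) :
    ∀ (m : Nat) (k : Nat) (acc : List Int), (hi - step * (curr + k)).toNat ≤ m →
      pvLoopA step lo hi curr hstep k acc =
        acc ++ (if lo ≤ step * (curr + (k : Int)) ∧ step * (curr + (k : Int)) < hi
          then (List.range (PySem.Int.floordiv (hi - 1) step - curr - k + 1).toNat).map
            (fun (j : Nat) => if lo > 0 then PySem.Int.mod (step * (curr + (k : Int) + (j : Int))) lo
                      else step * (curr + (k : Int) + (j : Int)))
          else []) := by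
  intro m
  induction m with
  | zero =>
    intro k acc hm
    rw [pvLoopA]
    have hcond : ¬ (lo ≤ step * (curr + (k : Int)) ∧ step * (curr + (k : Int)) < hi) := by
      intro h; omega
    rw [if_neg hcond, if_neg hcond]
    simp
  | succ m ih =>
    intro k acc hm
    rw [pvLoopA]
    by_cases h : lo ≤ step * (curr + (k : Int)) ∧ step * (curr + (k : Int)) < hi
    · rw [if_pos h, if_pos h]
      have hstepadd : step * (curr + ((k : Int) + 1)) = step * (curr + (k : Int)) + step := by ring
      have hmeas : (hi - step * (curr + ((k + 1 : Nat) : Int))).toNat ≤ m := by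
        push_cast
        omega
      rw [ih (k + 1) _ hmeas]
      have hK : curr + (k : Int) ≤ PySem.Int.floordiv (hi - 1) step := by
        rw [PySem.Int.le_floordiv_iff_mul_le hstep]
        nlinarith [h.2]
      by_cases hc : curr + (k : Int) + 1 ≤ PySem.Int.floordiv (hi - 1) step
      · -- more iterations remain
        have hcond2 : lo ≤ step * (curr + ((k + 1 : Nat) : Int)) ∧
            step * (curr + ((k + 1 : Nat) : Int)) < hi := by
          have h1 : (curr + (k : Int) + 1) * step ≤ hi - 1 := by
            rw [← PySem.Int.le_floordiv_iff_mul_le hstep]; exact hc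
          constructor
          · push_cast; nlinarith [h.1]
          · push_cast; nlinarith
        rw [if_pos hcond2]
        have hcnt : (PySem.Int.floordiv (hi - 1) step - curr - (k : Int) + 1).toNat
            = (PySem.Int.floordiv (hi - 1) step - curr - ((k + 1 : Nat) : Int) + 1).toNat + 1 := by
          push_cast; omega
        rw [hcnt, List.range_succ_eq_map, List.map_cons, List.map_map, List.append_assoc,
          List.singleton_append]
        congr 2
        · simp
        · apply List.map_congr_left
          intro a _
          simp only [Function.comp_apply]
          have harg : curr + ((k + 1 : Nat) : Int) + (a : Int) = curr + (k : Int) + ((Nat.succ a : Nat) : Int) := by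
            push_cast; ring
          rw [harg]
      · -- last iteration
        have hcond2 : ¬ (lo ≤ step * (curr + ((k + 1 : Nat) : Int)) ∧
            step * (curr + ((k + 1 : Nat) : Int)) < hi) := by
          intro h2
          apply hc
          rw [PySem.Int.le_floordiv_iff_mul_le hstep]
          have := h2.2
          push_cast at this
          nlinarith
        rw [if_neg hcond2]
        have hcnt : (PySem.Int.floordiv (hi - 1) step - curr - (k : Int) + 1).toNat = 1 := by omega
        rw [hcnt]
        simp
    · rw [if_neg h, if_neg h]
      simp

theorem get_display_indices_spec : Claim_equal_get_display_indices := by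
  intro batch_index batch_size num_display len_loader curr_len_display _
  unfold Spec_get_display_indices get_display_indices get_display_indices_alt
  by_cases hn : num_display == 0
  · simp [hn]
  simp only [hn, Bool.false_eq_true, if_false]
  set q := PySem.Int.floordiv (len_loader * batch_size) num_display with hq
  set step := if q > 0 then q else 1 with hstepdef
  have hstep : 0 < step := by rw [hstepdef]; split <;> omega
  set lo := batch_index * batch_size with hlo
  set hi := min ((batch_index + 1) * batch_size) (len_loader * batch_size) with hhi
  rw [pvLoopA_eq step lo hi curr_len_display _ (hi - step * (curr_len_display + (0 : Nat))).toNat 0 [] le_rfl]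
  simp only [Nat.cast_zero, add_zero, List.nil_append]
  by_cases hv : lo ≤ step * curr_len_display ∧ step * curr_len_display < hi
  · rw [if_pos hv, if_pos hv]
    rw [PySem.List.pyRange_one, List.map_map]
    have hcneq : ((PySem.Int.floordiv (hi - 1) step - curr_len_display + 1) - 0).toNat
        = (PySem.Int.floordiv (hi - 1) step - curr_len_display - 0 + 1).toNat := by omega
    rw [hcneq]
    congr 1
    funext j
    by_cases hq0 : 0 < PySem.Int.floordiv (len_loader * batch_size) num_display
    · simp [hstepdef, hq, hq0]
    · simp [hstepdef, hq, hq0]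
  · rw [if_neg hv, if_neg hv]
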